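-- pv_equiv track=rewrite | github.com/etherbeing/cveforge | core/compression/flog.py | binaryzate
-- ===== SOURCE A (Python) =====
-- from typing import Any, TypedDict
--
-- def list_to_bits(array: set[Any], base: int = 2):
--     # bit_array_length = math.ceil(math.log(max(array), 2))
--     return sum(map(lambda x: base**x, array))  # 2 is the binary base
--
-- def binaryzate(array: list[int]):
--     temp: set[int] = set()
--     repetitions: list[int] = []
--     # FIXME THERE IS AN ERROR IN THE ALGORITHM WE CANNOT RECUSIVELLY ITERATES AS WE ARE LOSING INFORMATION EACH TIME WE DO IT
--     copied: list[int] = sorted(set(array))  # In order to count and so on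
--     # if max(copied) >= 2**8:
--     #     raise ValueError("We cannot binaryzate an array of numbers higher than maximum binary size")
--     for x in copied:
--         temp.add(
--             x
--         )  # t and e even though they appear like not they actually share the same size
--         repetitions.append(array.count(x))
--
--     return list_to_bits(temp), repetitions if max(set(repetitions)) > 1 else None
-- ===== SOURCE B (Python) =====
-- def binaryzate(array: list[int]):
--     # Single run-length scan over the sorted array: each run gives one
--     # distinct value (added to the bitmask) and its multiplicity.
--     s = sorted(array)
--     bits = 0
--     repetitions: list[int] = []
--     i = 0
--     n = len(s)
--     while i < n:
--         j = i
--         while j < n and s[j] == s[i]: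
--             j += 1
--         bits += 2 ** s[i]
--         repetitions.append(j - i)
--         i = j
--     return bits, repetitions if max(set(repetitions)) > 1 else None
-- ===== Notes on version B (the rewrite author's own statement) =====
-- stated objective: alternative
-- what changed: Replaces A's sorted(set(...)) plus a full array.count scan per distinct value with one sort followed by a single run-length scan that yields each distinct value and its multiplicity in one grouped pass.
-- outside the precondition, e.g. on binaryzate([-1]): A returns (0.5, None), B returns (0.5, None)
import Mathlib
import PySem

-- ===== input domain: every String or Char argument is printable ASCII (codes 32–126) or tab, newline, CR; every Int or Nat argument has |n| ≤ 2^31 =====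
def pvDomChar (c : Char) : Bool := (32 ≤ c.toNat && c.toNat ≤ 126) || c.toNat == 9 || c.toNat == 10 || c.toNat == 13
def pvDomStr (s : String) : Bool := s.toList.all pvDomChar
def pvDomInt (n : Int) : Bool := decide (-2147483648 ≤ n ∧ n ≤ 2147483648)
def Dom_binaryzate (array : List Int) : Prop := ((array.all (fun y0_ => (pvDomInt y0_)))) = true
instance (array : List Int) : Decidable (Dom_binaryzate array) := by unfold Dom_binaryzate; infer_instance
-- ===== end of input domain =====

-- B replaces A's per-distinct-value array.count scans with one sort and a single
-- run-length pass over the sorted list (objective: alternative decomposition).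

-- ===== PORT A =====
-- list_to_bits(temp): sum(2**x for x in temp); a sum over a set is order-independent.
-- '2**x' is exact for 0 ≤ x (Pre_ excludes negative elements, where Python returns a float).
def listToBits (s : PySem.Set Int) : Int :=
  (s.map (fun x => (2 : Int) ^ x.toNat)).sum

def binaryzate (array : List Int) : Int × Option (List Int) :=
  -- copied = sorted(set(array))
  let copied : List Int := PySem.List.sorted (PySem.Set.ofList array) (fun x => x) false
  -- for x in copied: temp.add(x); repetitions.append(array.count(x))
  let st := copied.foldl
      (fun (st : PySem.Set Int × List Int) x =>
        (PySem.Set.add st.1 x, st.2 ++ [(PySem.List.count array x : Int)]))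
      (PySem.Set.empty, [])
  let temp := st.1
  let repetitions := st.2
  -- repetitions if max(set(repetitions)) > 1 else None  (max of [] raises: Pre_ excludes array = [])
  match PySem.List.max? (PySem.Set.ofList repetitions) (fun y => y) with
  | some m => (listToBits temp, if m > 1 then some repetitions else none)
  | none => (listToBits temp, none)

-- ===== PORT B =====
-- the inner 'while j < n and s[j] == s[i]' run scan of Source B
def groupRuns : List Int → List (Int × Nat)
  | [] => []
  | x :: xs =>
    (x, (xs.takeWhile (· == x)).length + 1) :: groupRuns (xs.dropWhile (· == x))
termination_by l => l.length
decreasing_by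
  simpa [Nat.lt_succ_iff] using (List.dropWhile_sublist (l := xs) (p := (· == x))).length_le

def binaryzate_alt (array : List Int) : Int × Option (List Int) :=
  let s := PySem.List.sorted array (fun x => x) false
  let gs := groupRuns s
  -- bits += 2 ** s[i]  over the runs ('2**k' exact for 0 ≤ k, see Pre_)
  let bits := gs.foldl (fun acc p => acc + (2 : Int) ^ p.1.toNat) 0
  -- repetitions.append(j - i)
  let repetitions := gs.foldl (fun acc (p : Int × Nat) => acc ++ [(p.2 : Int)]) []
  match PySem.List.max? (PySem.Set.ofList repetitions) (fun y => y) with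
  | some m => (bits, if m > 1 then some repetitions else none)
  | none => (bits, none)

-- ===== PRECONDITION & SPEC =====
-- Pre_ excludes the empty list (max() of an empty sequence: ValueError in both A and B)
-- and lists with a negative element, where Python's 2**x is a float, not a value of the
-- declared int type (both A and B return the same float there).
def Pre_binaryzate (array : List Int) : Prop := array ≠ [] ∧ ∀ x ∈ array, 0 ≤ x
instance (array : List Int) : Decidable (Pre_binaryzate array) := by unfold Pre_binaryzate; infer_instance

def pvWitness_binaryzate : List Int := [3, 1, 3, 0]

def Spec_binaryzate (array : List Int) (out : Int × Option (List Int)) : Prop := out = binaryzate_alt array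
instance (array : List Int) (out : Int × Option (List Int)) : Decidable (Spec_binaryzate array out) := by unfold Spec_binaryzate; infer_instance

-- ===== CLAIM (what is proved, stated in full; the proofs are below) =====
def Claim_equal_binaryzate : Prop := ∀ (array : List Int), Dom_binaryzate array → Pre_binaryzate array → Spec_binaryzate array (binaryzate array)

-- ===== LEMMAS AND PROOFS =====

-- a sorted list that starts at x has no x left after dropping the leading run of x's
lemma not_mem_dropWhile_of_sorted (x : Int) (xs : List Int)
    (hs : xs.Pairwise (· ≤ ·)) (hx : ∀ y ∈ xs, x ≤ y) :
    x ∉ xs.dropWhile (· == x) := by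
  induction xs with
  | nil => simp
  | cons a t ih =>
    by_cases ha : a = x
    · subst ha
      rw [List.dropWhile_cons_of_pos (by simp)]
      exact ih hs.tail (fun y hy => hx y (List.mem_cons_of_mem _ hy))
    · rw [List.dropWhile_cons_of_neg (by simpa using ha)]
      intro hmem
      rcases List.mem_cons.1 hmem with h | h
      · exact ha h.symm
      · have h1 : a ≤ x := (List.pairwise_cons.1 hs).1 x h
        have h2 : x ≤ a := hx a List.mem_cons_self
        exact ha (le_antisymm h1 h2)

-- key structural lemma: on a sorted list, groupRuns yields, in order, the strictly
-- increasing distinct values paired with their counts in the whole list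
lemma groupRuns_spec (l : List Int) (hs : l.Pairwise (· ≤ ·)) :
    (∀ y, y ∈ (groupRuns l).map Prod.fst ↔ y ∈ l) ∧
    ((groupRuns l).map Prod.fst).Pairwise (· < ·) ∧
    groupRuns l = ((groupRuns l).map Prod.fst).map (fun x => (x, l.count x)) := by
  induction l using groupRuns.induct with
  | case1 => simp [groupRuns]
  | case2 x xs ih =>
    set run := xs.takeWhile (· == x) with hrun
    set rest := xs.dropWhile (· == x) with hrest
    have hxle : ∀ y ∈ xs, x ≤ y := fun y hy => (List.pairwise_cons.1 hs).1 y hy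
    have hsrest : rest.Pairwise (· ≤ ·) :=
      hs.tail.sublist (List.dropWhile_sublist _)
    have hxrest : x ∉ rest := not_mem_dropWhile_of_sorted x xs hs.tail hxle
    have hrestlt : ∀ y ∈ rest, x < y := by
      intro y hy
      have : x ≤ y := hxle y ((List.dropWhile_sublist _).mem hy)
      rcases lt_or_eq_of_le this with h | h
      · exact h
      · exact absurd (h ▸ hy) hxrest
    have hruneq : ∀ y ∈ run, y = x := by
      intro y hy
      simpa using List.mem_takeWhile_imp hy
    obtain ⟨ihmem, ihpw, iheq⟩ := ih hsrest
    have hsplit : run ++ rest = xs := List.takeWhile_append_dropWhile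
    refine ⟨?_, ?_, ?_⟩
    · intro y
      simp only [groupRuns, List.map_cons, List.mem_cons]
      rw [← hrest, ihmem y]
      constructor
      · rintro (rfl | h)
        · exact Or.inl rfl
        · exact Or.inr (by rw [← hsplit]; exact List.mem_append_right _ h)
      · rintro (rfl | h)
        · exact Or.inl rfl
        · rw [← hsplit] at h
          rcases List.mem_append.1 h with h | h
          · exact Or.inl (hruneq y h)
          · exact Or.inr h
    · simp only [groupRuns, List.map_cons]
      rw [← hrest]
      refine List.pairwise_cons.2 ⟨?_, ihpw⟩
      intro y hy
      exact hrestlt y ((ihmem y).1 hy)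
    · simp only [groupRuns, List.map_cons]
      rw [← hrest, ← hrun]
      congr 1
      · have hcx : (x :: xs).count x = run.length + 1 := by
          rw [← hsplit, List.count_cons_self, List.count_append,
            List.count_eq_length.2 (fun b hb => ((hruneq b hb).symm : x = b)),
            List.count_eq_zero.2 hxrest]
        simp [hcx]
      · conv_lhs => rw [iheq]
        apply List.map_congr_left
        intro y hy
        have hyrest : y ∈ rest := (ihmem y).1 hy
        have hynex : y ≠ x := fun h => hxrest (h ▸ hyrest)
        have hynerun : y ∉ run := fun h => hynex (hruneq y h)
        congr 1
        rw [← hsplit, List.count_cons, List.count_append,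
          List.count_eq_zero.2 hynerun]
        have hxy : ¬ x = y := fun h => hynex h.symm
        simp [hxy]

-- the keys of B's run scan are exactly A's sorted(set(array))
lemma keys_eq (array : List Int) :
    (groupRuns (PySem.List.sorted array (fun x => x) false)).map Prod.fst
      = PySem.List.sorted (PySem.Set.ofList array) (fun x => x) false := by
  set l := PySem.List.sorted array (fun x => x) false with hl
  have hs : l.Pairwise (· ≤ ·) := by
    simpa using PySem.List.sorted_pairwise array (fun x => x)
  obtain ⟨hmem, hpw, _⟩ := groupRuns_spec l hs
  have hperm : ((groupRuns l).map Prod.fst).Perm (PySem.Set.ofList array) := by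
    have hnodup : ((groupRuns l).map Prod.fst).Nodup := by exact hpw.imp ne_of_lt
    refine (List.perm_ext_iff_of_nodup hnodup (PySem.Set.nodup_ofList _)).2 ?_
    intro a
    rw [hmem a, PySem.Set.mem_ofList, hl]
    exact PySem.List.mem_sorted array (fun x => x) false a
  exact (PySem.List.sorted_eq_of_perm_of_pairwise_lt _ _ (fun x => x) hperm
    (by simpa using hpw)).symm

lemma counts_eq (array : List Int) :
    groupRuns (PySem.List.sorted array (fun x => x) false)
      = (PySem.List.sorted (PySem.Set.ofList array) (fun x => x) false).map
          (fun x => (x, array.count x)) := by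
  set l := PySem.List.sorted array (fun x => x) false with hl
  have hs : l.Pairwise (· ≤ ·) := by
    simpa using PySem.List.sorted_pairwise array (fun x => x)
  obtain ⟨_, _, heq⟩ := groupRuns_spec l hs
  rw [heq, keys_eq]
  apply List.map_congr_left
  intro y _
  have : l.count y = array.count y :=
    (PySem.List.sorted_perm array (fun x => x) false).count_eq y
  rw [this]

-- ===== VERDICT (by name: the statement is the Claim_ definition above) =====
theorem binaryzate_spec : Claim_equal_binaryzate := by
  intro array _ _
  unfold Spec_binaryzate
  simp only [binaryzate, binaryzate_alt, counts_eq]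
  set copied := PySem.List.sorted (PySem.Set.ofList array) (fun x => x) false with hc
  have hnd : copied.Nodup :=
    ((PySem.List.sorted_perm (PySem.Set.ofList array) (fun x => x) false).nodup_iff).2
      (PySem.Set.nodup_ofList _)
  -- A's loop: two independent accumulators
  rw [PySem.List.foldl_prod_mk
      (f := fun (s : PySem.Set Int) x => PySem.Set.add s x)
      (g := fun (acc : List Int) x => acc ++ [(PySem.List.count array x : Int)])]
  -- A's temp = set built by folding add over copied = copied itself (copied is nodup)
  have htemp : copied.foldl (fun s x => PySem.Set.add s x) PySem.Set.empty = copied := by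
    have h0 : copied.foldl (fun s x => PySem.Set.add s x) PySem.Set.empty
        = PySem.Set.ofList copied := rfl
    rw [h0]
    exact PySem.Set.ofList_eq_self_of_nodup copied hnd
  rw [htemp]
  -- both repetition lists are copied.map (count in array)
  rw [PySem.List.foldl_append_singleton_eq_map, PySem.List.foldl_append_singleton_eq_map]
  -- both bit sums are the same sum over copied
  have hbits : List.foldl (fun acc (p : Int × Nat) => acc + (2 : Int) ^ p.1.toNat) 0
        (copied.map (fun x => (x, List.count x array)))
      = listToBits copied := by
    rw [PySem.List.foldl_add (g := fun p : Int × Nat => (2 : Int) ^ p.1.toNat)]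
    simp [listToBits, List.map_map, Function.comp_def]
  rw [hbits]
  simp only [List.nil_append, List.map_map, Function.comp_def, PySem.List.count_eq]
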